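-- pv_equiv track=rewrite | github.com/tomduck/baseclef | scripts/postprocess.py | tidy_html
-- ===== SOURCE A (Python) =====
-- def tidy_html(lines):
--     """Aesthetic improvements to pandoc's html output."""
--
--     # Add some space around hr tags
--     for i, line in enumerate(lines):
--         lines[i] = line.replace('<hr />', '\n<hr />\n')
--
--     # Don't separate </div> tags from their descriptions
--     for i, line in enumerate(lines[:-1]):
--         if line.startswith('</div>') and lines[i+1].startswith('<!--') \
--             and lines[i+1].rstrip().endswith('-->'):
--             lines[i] = lines[i][:-1] + ' ' + lines[i+1] + '\n'
--             lines[i+1] = None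
--             continue
--         if line.startswith('</div>') and lines[i+1].startswith('<p><!--') \
--             and lines[i+1].rstrip().endswith('--></p>'):
--             lines[i] = lines[i][:-1] + ' ' + lines[i+1][3:-5] + '\n'
--             lines[i+1] = None
--             continue
--     lines = [line for line in lines if line is not None]
--
--     # Put some space before the div body tag
--     for i, line in enumerate(lines):
--         if line.startswith('<div class="body">'):
--             lines[i] = '\n' + line
--
--     return lines
-- ===== SOURCE B (Python) =====
-- def tidy_html(lines):
--     """Aesthetic improvements to pandoc's html output."""
--     out = []
--     i, n = 0, len(lines)
--     while i < n:
--         line = lines[i].replace('<hr />', '\n<hr />\n')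
--         if i + 1 < n and line.startswith('</div>'):
--             nxt = lines[i+1].replace('<hr />', '\n<hr />\n')
--             if nxt.startswith('<!--') and nxt.rstrip().endswith('-->'):
--                 out.append(line[:-1] + ' ' + nxt + '\n')
--                 i += 2
--                 continue
--             if nxt.startswith('<p><!--') and nxt.rstrip().endswith('--></p>'):
--                 out.append(line[:-1] + ' ' + nxt[3:-5] + '\n')
--                 i += 2
--                 continue
--         out.append('\n' + line if line.startswith('<div class="body">') else line)
--         i += 1
--     return out
-- ===== Notes on version B (the rewrite author's own statement) =====
-- stated objective: simpler
-- what changed: B replaces A's three mutating passes over the list (hr-spacing rewrite, </div>-comment merge via None sentinels plus a None-filter, div-body spacing) by a single forward pass with an index that looks one line ahead, merges and skips in place, and applies both cosmetic rewrites as each output line is emitted.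
import Mathlib
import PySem

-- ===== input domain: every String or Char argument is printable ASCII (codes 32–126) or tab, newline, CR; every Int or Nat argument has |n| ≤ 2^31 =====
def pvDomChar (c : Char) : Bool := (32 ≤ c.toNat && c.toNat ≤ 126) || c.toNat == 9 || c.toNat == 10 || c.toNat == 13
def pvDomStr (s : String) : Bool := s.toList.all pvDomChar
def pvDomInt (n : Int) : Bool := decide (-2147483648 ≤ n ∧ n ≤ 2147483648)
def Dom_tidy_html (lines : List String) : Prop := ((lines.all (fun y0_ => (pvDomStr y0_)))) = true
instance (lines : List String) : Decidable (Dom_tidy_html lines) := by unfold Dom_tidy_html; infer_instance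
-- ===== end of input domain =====

-- B rewrites A's three mutating passes (plus None-filter) as one forward pass with a one-line
-- look-ahead; same return value. Python's A mutates its argument in place — the equivalence
-- proved here is about the RETURN value only.
-- Both ports compute on List Char (PySem.Chars primitives); Python `+` on str is List.append
-- there, and Strings are rebuilt only at the end (exact on the stated ASCII domain).

-- ===== PORT A =====
-- line.replace('<hr />', '\n<hr />\n')
def pvHr (cs : List Char) : List Char :=
  PySem.Chars.replace cs "<hr />".toList "\n<hr />\n".toList

-- one iteration of A's second loop `for i, line in enumerate(lines[:-1])`; a cell holds
-- `none` for Python's None. `i` comes from enumerate, so 0 ≤ i and `.toNat` is exact.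
-- (Python would crash on `None.startswith`; the `| _ => st` arms are that unreachable case.)
def pvStepA (st : List (Option (List Char))) (p : Int × List Char) : List (Option (List Char)) :=
  if PySem.Chars.startswith p.2 "</div>".toList then
    match PySem.List.pyGet? st (p.1 + 1) with
    | some (some nxt) =>
      if PySem.Chars.startswith nxt "<!--".toList
          && PySem.Chars.endswith (PySem.Chars.rstrip nxt) "-->".toList then
        match PySem.List.pyGet? st p.1 with
        | some (some cur) =>
            (st.set p.1.toNat (some (PySem.List.slice cur none (some (-1)) ++ " ".toList
              ++ nxt ++ ['\n']))).set (p.1 + 1).toNat none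
        | _ => st
      else if PySem.Chars.startswith nxt "<p><!--".toList
          && PySem.Chars.endswith (PySem.Chars.rstrip nxt) "--></p>".toList then
        match PySem.List.pyGet? st p.1 with
        | some (some cur) =>
            (st.set p.1.toNat (some (PySem.List.slice cur none (some (-1)) ++ " ".toList
              ++ PySem.List.slice nxt (some 3) (some (-5)) ++ ['\n']))).set (p.1 + 1).toNat none
        | _ => st
      else st
    | _ => st
  else st

def tidy_html (lines : List String) : List String :=
  let l1 := lines.map (fun s => pvHr s.toList)
  let st := (PySem.List.enumerate (PySem.List.slice l1 none (some (-1))) 0).foldl pvStepA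
              (l1.map some)
  ((st.filterMap id).map (fun line =>
      if PySem.Chars.startswith line "<div class=\"body\">".toList then '\n' :: line
      else line)).map String.ofList

-- ===== PORT B =====
def pvPost (line : List Char) : List Char :=
  if PySem.Chars.startswith line "<div class=\"body\">".toList then '\n' :: line else line

-- line[:-1] + ' ' + nxt + '\n'
def pvMerge1 (line nxt : List Char) : List Char :=
  PySem.List.slice line none (some (-1)) ++ " ".toList ++ nxt ++ ['\n']

-- line[:-1] + ' ' + nxt[3:-5] + '\n'
def pvMerge2 (line nxt : List Char) : List Char :=
  PySem.List.slice line none (some (-1)) ++ " ".toList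
    ++ PySem.List.slice nxt (some 3) (some (-5)) ++ ['\n']

-- Source B's while loop over the index: consume one line (i += 1) or merge two (i += 2)
def pvTidyB : List (List Char) → List (List Char)
  | [] => []
  | [l0] => [pvPost (pvHr l0)]
  | l0 :: n0 :: rest =>
    let line := pvHr l0
    if PySem.Chars.startswith line "</div>".toList then
      let nxt := pvHr n0
      if PySem.Chars.startswith nxt "<!--".toList
          && PySem.Chars.endswith (PySem.Chars.rstrip nxt) "-->".toList then
        pvMerge1 line nxt :: pvTidyB rest
      else if PySem.Chars.startswith nxt "<p><!--".toList
          && PySem.Chars.endswith (PySem.Chars.rstrip nxt) "--></p>".toList then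
        pvMerge2 line nxt :: pvTidyB rest
      else pvPost line :: pvTidyB (n0 :: rest)
    else pvPost line :: pvTidyB (n0 :: rest)
termination_by l => l.length
decreasing_by all_goals simp

def tidy_html_alt (lines : List String) : List String :=
  (pvTidyB (lines.map String.toList)).map String.ofList

-- ===== PRECONDITION & SPEC =====
def Spec_tidy_html (lines : List String) (out : List String) : Prop := out = tidy_html_alt lines
instance (lines : List String) (out : List String) : Decidable (Spec_tidy_html lines out) := by unfold Spec_tidy_html; infer_instance

-- ===== CLAIM (what is proved, stated in full; the proofs are below) =====
def Claim_equal_tidy_html : Prop := ∀ (lines : List String), Dom_tidy_html lines → Spec_tidy_html lines (tidy_html lines)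

-- ===== LEMMAS AND PROOFS =====

-- the common merge skeleton: A's second pass and its None-filter compute exactly this
def pvM : List (List Char) → List (List Char)
  | [] => []
  | [l] => [l]
  | l :: n :: rest =>
    if PySem.Chars.startswith l "</div>".toList then
      if PySem.Chars.startswith n "<!--".toList
          && PySem.Chars.endswith (PySem.Chars.rstrip n) "-->".toList then
        pvMerge1 l n :: pvM rest
      else if PySem.Chars.startswith n "<p><!--".toList
          && PySem.Chars.endswith (PySem.Chars.rstrip n) "--></p>".toList then
        pvMerge2 l n :: pvM rest
      else l :: pvM (n :: rest)
    else l :: pvM (n :: rest)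
termination_by l => l.length
decreasing_by all_goals simp

-- a line starting with '<!--' (resp. '<p><!--') does not start with '</div>'
lemma pv_not_div₁ (n : List Char) (h : PySem.Chars.startswith n "<!--".toList = true) :
    PySem.Chars.startswith n "</div>".toList = false := by
  have e1 : "<!--".toList = ['<', '!', '-', '-'] := rfl
  have e2 : "</div>".toList = ['<', '/', 'd', 'i', 'v', '>'] := rfl
  rw [e1, PySem.Chars.startswith_iff] at h
  obtain ⟨t, rfl⟩ := h
  rw [e2, Bool.eq_false_iff]
  intro hcon
  rw [PySem.Chars.startswith_iff] at hcon
  rcases hcon with ⟨t2, ht2⟩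
  simp at ht2

lemma pv_not_div₂ (n : List Char) (h : PySem.Chars.startswith n "<p><!--".toList = true) :
    PySem.Chars.startswith n "</div>".toList = false := by
  have e1 : "<p><!--".toList = ['<', 'p', '>', '<', '!', '-', '-'] := rfl
  have e2 : "</div>".toList = ['<', '/', 'd', 'i', 'v', '>'] := rfl
  rw [e1, PySem.Chars.startswith_iff] at h
  obtain ⟨t, rfl⟩ := h
  rw [e2, Bool.eq_false_iff]
  intro hcon
  rw [PySem.Chars.startswith_iff] at hcon
  rcases hcon with ⟨t2, ht2⟩
  simp at ht2

-- a merged line (it starts with '</div') is unchanged by the div-body pass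
lemma pvPost_slice (line tail : List Char)
    (h : PySem.Chars.startswith line "</div>".toList = true) :
    pvPost (PySem.List.slice line none (some (-1)) ++ tail)
      = PySem.List.slice line none (some (-1)) ++ tail := by
  have e2 : "</div>".toList = ['<', '/', 'd', 'i', 'v', '>'] := rfl
  have e3 : "<div class=\"body\">".toList
      = ['<', 'd', 'i', 'v', ' ', 'c', 'l', 'a', 's', 's', '=', '"', 'b', 'o', 'd', 'y', '"', '>'] := rfl
  rw [e2, PySem.Chars.startswith_iff] at h
  obtain ⟨t, rfl⟩ := h
  rw [PySem.List.slice_to_neg_one]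
  simp only [List.cons_append, List.dropLast_cons₂]
  simp [pvPost, e3, PySem.Chars.startswith_iff, List.cons_prefix_cons]

lemma pvPost_merge1 (line nxt : List Char)
    (h : PySem.Chars.startswith line "</div>".toList = true) :
    pvPost (pvMerge1 line nxt) = pvMerge1 line nxt := by
  unfold pvMerge1
  rw [List.append_assoc, List.append_assoc]
  exact pvPost_slice line _ h

lemma pvPost_merge2 (line nxt : List Char)
    (h : PySem.Chars.startswith line "</div>".toList = true) :
    pvPost (pvMerge2 line nxt) = pvMerge2 line nxt := by
  unfold pvMerge2
  rw [List.append_assoc, List.append_assoc]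
  exact pvPost_slice line _ h

-- B's fused pass is post-processing ∘ merge skeleton ∘ hr pass
lemma pvLB (ls : List (List Char)) : pvTidyB ls = (pvM (ls.map pvHr)).map pvPost := by
  induction ls using pvTidyB.induct with
  | case1 => rw [pvTidyB]; simp [pvM]
  | case2 l0 => rw [pvTidyB]; simp [pvM]
  | case3 l0 n0 rest line hdiv nxt hc1 ih =>
      have hd : PySem.Chars.startswith (pvHr l0) "</div>".toList = true := hdiv
      have h1 : (PySem.Chars.startswith (pvHr n0) "<!--".toList
          && PySem.Chars.endswith (PySem.Chars.rstrip (pvHr n0)) "-->".toList) = true := hc1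
      simp only [pvTidyB, List.map_cons]
      rw [pvM]
      simp only [if_pos hd, if_pos h1, List.map_cons]
      rw [pvPost_merge1 _ _ hd, ih]
  | case4 l0 n0 rest line hdiv nxt hc1 hc2 ih =>
      have hd : PySem.Chars.startswith (pvHr l0) "</div>".toList = true := hdiv
      have h1 : ¬ ((PySem.Chars.startswith (pvHr n0) "<!--".toList
          && PySem.Chars.endswith (PySem.Chars.rstrip (pvHr n0)) "-->".toList) = true) := hc1
      have h2 : (PySem.Chars.startswith (pvHr n0) "<p><!--".toList
          && PySem.Chars.endswith (PySem.Chars.rstrip (pvHr n0)) "--></p>".toList) = true := hc2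
      simp only [pvTidyB, List.map_cons]
      rw [pvM]
      simp only [if_pos hd, if_neg h1, if_pos h2, List.map_cons]
      rw [pvPost_merge2 _ _ hd, ih]
  | case5 l0 n0 rest line hdiv nxt hc1 hc2 ih =>
      have hd : PySem.Chars.startswith (pvHr l0) "</div>".toList = true := hdiv
      have h1 : ¬ ((PySem.Chars.startswith (pvHr n0) "<!--".toList
          && PySem.Chars.endswith (PySem.Chars.rstrip (pvHr n0)) "-->".toList) = true) := hc1
      have h2 : ¬ ((PySem.Chars.startswith (pvHr n0) "<p><!--".toList
          && PySem.Chars.endswith (PySem.Chars.rstrip (pvHr n0)) "--></p>".toList) = true) := hc2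
      simp only [pvTidyB, List.map_cons]
      rw [pvM]
      simp only [if_pos hd, if_neg h1, if_neg h2, List.map_cons]
      rw [ih]
      simp only [List.map_cons]
  | case6 l0 n0 rest line hdiv ih =>
      have hd : ¬ (PySem.Chars.startswith (pvHr l0) "</div>".toList = true) := hdiv
      simp only [pvTidyB, List.map_cons]
      rw [pvM]
      simp only [if_neg hd, List.map_cons]
      rw [ih]
      simp only [List.map_cons]

-- A's loop step at an index past a frozen prefix P acts on the suffix alone
lemma pvStepA_shift (P Q : List (Option (List Char))) (j : Nat) (e : List Char) :
    pvStepA (P ++ Q) (((P.length + j : Nat) : Int), e) = P ++ pvStepA Q ((j : Nat), e) := by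
  have h1 : (((P.length + j : Nat) : Int) + 1) = ((P.length + (j + 1) : Nat) : Int) := by
    push_cast; ring
  have h2 : ((j : Nat) : Int) + 1 = (((j + 1 : Nat)) : Int) := by push_cast; ring
  have hg1 : PySem.List.pyGet? (P ++ Q) (((P.length + j : Nat) : Int) + 1)
      = PySem.List.pyGet? Q (((j : Nat) : Int) + 1) := by
    rw [h1, h2, PySem.List.pyGet?_natCast, PySem.List.pyGet?_natCast,
      List.getElem?_append_right (by omega)]
    congr 1
    omega
  have hg0 : PySem.List.pyGet? (P ++ Q) ((P.length + j : Nat) : Int)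
      = PySem.List.pyGet? Q ((j : Nat) : Int) := by
    rw [PySem.List.pyGet?_natCast, PySem.List.pyGet?_natCast,
      List.getElem?_append_right (by omega)]
    congr 1
    omega
  have hs0 : ∀ (R : List (Option (List Char))) (x : Option (List Char)),
      (P ++ R).set (((P.length + j : Nat) : Int)).toNat x = P ++ R.set (((j : Nat) : Int)).toNat x := by
    intro R x
    rw [Int.toNat_natCast, Int.toNat_natCast, List.set_append_right _ _ (by omega)]
    congr 2
    omega
  have hs1 : ∀ (R : List (Option (List Char))) (x : Option (List Char)),
      (P ++ R).set ((((P.length + j : Nat) : Int)) + 1).toNat x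
        = P ++ R.set ((((j : Nat) : Int)) + 1).toNat x := by
    intro R x
    rw [h1, h2, Int.toNat_natCast, Int.toNat_natCast, List.set_append_right _ _ (by omega)]
    congr 2
    omega
  simp only [pvStepA, hg1, hg0]
  by_cases hd : PySem.Chars.startswith e "</div>".toList = true
  · simp only [hd, if_pos]
    cases hq : PySem.List.pyGet? Q (((j : Nat) : Int) + 1) with
    | none => rfl
    | some o =>
      cases o with
      | none => rfl
      | some nxt =>
        by_cases hc1 : (PySem.Chars.startswith nxt "<!--".toList
            && PySem.Chars.endswith (PySem.Chars.rstrip nxt) "-->".toList) = true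
        · simp only [hc1, if_pos]
          cases hq0 : PySem.List.pyGet? Q ((j : Nat) : Int) with
          | none => rfl
          | some o0 =>
            cases o0 with
            | none => rfl
            | some cur => simp only [hs0, hs1]
        · simp only [hc1, if_neg, Bool.false_eq_true, not_false_iff]
          by_cases hc2 : (PySem.Chars.startswith nxt "<p><!--".toList
              && PySem.Chars.endswith (PySem.Chars.rstrip nxt) "--></p>".toList) = true
          · simp only [hc2, if_pos]
            cases hq0 : PySem.List.pyGet? Q ((j : Nat) : Int) with
            | none => rfl
            | some o0 =>
              cases o0 with
              | none => rfl
              | some cur => simp only [hs0, hs1]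
          · simp only [hc2, Bool.false_eq_true, if_neg, not_false_iff]
  · simp only [Bool.not_eq_true] at hd
    simp only [hd, Bool.false_eq_true, if_neg, not_false_iff]

-- the whole remaining loop past a frozen prefix acts on the suffix alone
lemma pvFold_shift (es : List (List Char)) :
    ∀ (Q : List (Option (List Char))) (j : Nat) (P : List (Option (List Char))),
    (PySem.List.enumerate es ((P.length + j : Nat) : Int)).foldl pvStepA (P ++ Q)
      = P ++ (PySem.List.enumerate es ((j : Nat) : Int)).foldl pvStepA Q := by
  induction es with
  | nil => intro Q j P; simp [PySem.List.enumerate_nil]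
  | cons e es ih =>
      intro Q j P
      rw [PySem.List.enumerate_cons, PySem.List.enumerate_cons]
      simp only [List.foldl_cons]
      rw [pvStepA_shift]
      have h1 : (((P.length + j : Nat) : Int) + 1) = ((P.length + (j + 1) : Nat) : Int) := by
        push_cast; ring
      have h2 : ((j : Nat) : Int) + 1 = (((j + 1 : Nat)) : Int) := by push_cast; ring
      rw [h1, h2, ih]

-- A's loop step, evaluated at index 0 of the state
lemma pvStepA_zero (a b : List Char) (X : List (Option (List Char))) :
    pvStepA (some a :: some b :: X) (0, a) =
      if PySem.Chars.startswith a "</div>".toList then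
        if PySem.Chars.startswith b "<!--".toList
            && PySem.Chars.endswith (PySem.Chars.rstrip b) "-->".toList then
          some (pvMerge1 a b) :: none :: X
        else if PySem.Chars.startswith b "<p><!--".toList
            && PySem.Chars.endswith (PySem.Chars.rstrip b) "--></p>".toList then
          some (pvMerge2 a b) :: none :: X
        else some a :: some b :: X
      else some a :: some b :: X := by
  have hg0 : PySem.List.pyGet? (some a :: some b :: X) (0 : Int) = some (some a) := by
    rw [show ((0 : Int)) = ((0 : Nat) : Int) by norm_num, PySem.List.pyGet?_natCast]
    rfl
  simp [pvStepA, hg0, pvMerge1, pvMerge2]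

-- a step whose snapshot line does not start with '</div>' is a no-op
lemma pvStepA_noop (st : List (Option (List Char))) (i : Int) (b : List Char)
    (h : PySem.Chars.startswith b "</div>".toList = false) : pvStepA st (i, b) = st := by
  have h' : ¬ (PySem.Chars.startswith b "</div>".toList = true) := by
    intro hcon
    rw [hcon] at h
    cases h
  simp only [pvStepA]
  rw [if_neg h']

-- A's second pass plus the None-filter computes the merge skeleton
lemma pvLA (l1 : List (List Char)) :
    ((PySem.List.enumerate (PySem.List.slice l1 none (some (-1))) 0).foldl pvStepA
        (l1.map some)).filterMap id = pvM l1 := by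
  induction l1 using pvM.induct with
  | case1 => simp [PySem.List.slice_to_neg_one, PySem.List.enumerate_nil, pvM]
  | case2 l => simp [PySem.List.slice_to_neg_one, PySem.List.enumerate_nil, pvM]
  | case3 l n rest hdiv hc1 ih =>
      rw [PySem.List.slice_to_neg_one] at *
      rw [List.dropLast_cons₂, PySem.List.enumerate_cons]
      simp only [List.map_cons, List.foldl_cons]
      rw [pvStepA_zero]
      simp only [if_pos hdiv, if_pos hc1]
      have hb : PySem.Chars.startswith n "</div>".toList = false :=
        pv_not_div₁ n (Bool.and_elim_left hc1)
      cases rest with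
      | nil =>
          rw [pvM]
          simp only [if_pos hdiv, if_pos hc1]
          simp [PySem.List.enumerate_nil, pvM]
      | cons r rs =>
          rw [List.dropLast_cons₂, PySem.List.enumerate_cons]
          simp only [List.foldl_cons]
          rw [pvStepA_noop _ _ _ hb]
          rw [show ((0 : Int) + 1 + 1)
              = ((([some (pvMerge1 l n), none] : List (Option (List Char))).length + 0 : Nat) : Int)
            by norm_num]
          rw [show (some (pvMerge1 l n) :: none :: List.map some (r :: rs))
              = ([some (pvMerge1 l n), none] : List (Option (List Char))) ++ List.map some (r :: rs)
            from rfl]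
          rw [pvFold_shift]
          simp only [Nat.cast_zero, List.filterMap_append]
          rw [ih, pvM]
          simp only [if_pos hdiv, if_pos hc1]
          rfl
  | case4 l n rest hdiv hc1 hc2 ih =>
      rw [PySem.List.slice_to_neg_one] at *
      rw [List.dropLast_cons₂, PySem.List.enumerate_cons]
      simp only [List.map_cons, List.foldl_cons]
      rw [pvStepA_zero]
      simp only [if_pos hdiv, if_neg hc1, if_pos hc2]
      have hb : PySem.Chars.startswith n "</div>".toList = false :=
        pv_not_div₂ n (Bool.and_elim_left hc2)
      cases rest with
      | nil =>
          rw [pvM]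
          simp only [if_pos hdiv, if_neg hc1, if_pos hc2]
          simp [PySem.List.enumerate_nil, pvM]
      | cons r rs =>
          rw [List.dropLast_cons₂, PySem.List.enumerate_cons]
          simp only [List.foldl_cons]
          rw [pvStepA_noop _ _ _ hb]
          rw [show ((0 : Int) + 1 + 1)
              = ((([some (pvMerge2 l n), none] : List (Option (List Char))).length + 0 : Nat) : Int)
            by norm_num]
          rw [show (some (pvMerge2 l n) :: none :: List.map some (r :: rs))
              = ([some (pvMerge2 l n), none] : List (Option (List Char))) ++ List.map some (r :: rs)
            from rfl]
          rw [pvFold_shift]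
          simp only [Nat.cast_zero, List.filterMap_append]
          rw [ih, pvM]
          simp only [if_pos hdiv, if_neg hc1, if_pos hc2]
          rfl
  | case5 l n rest hdiv hc1 hc2 ih =>
      rw [PySem.List.slice_to_neg_one] at *
      rw [List.dropLast_cons₂, PySem.List.enumerate_cons]
      simp only [List.map_cons, List.foldl_cons]
      rw [pvStepA_zero]
      simp only [if_pos hdiv, if_neg hc1, if_neg hc2]
      rw [show ((0 : Int) + 1)
          = ((([some l] : List (Option (List Char))).length + 0 : Nat) : Int) by norm_num]
      rw [show (some l :: some n :: List.map some rest)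
          = ([some l] : List (Option (List Char))) ++ List.map some (n :: rest) from rfl]
      rw [pvFold_shift]
      simp only [Nat.cast_zero, List.filterMap_append]
      rw [ih, pvM]
      simp only [if_pos hdiv, if_neg hc1, if_neg hc2]
      rfl
  | case6 l n rest hdiv ih =>
      rw [PySem.List.slice_to_neg_one] at *
      rw [List.dropLast_cons₂, PySem.List.enumerate_cons]
      simp only [List.map_cons, List.foldl_cons]
      rw [pvStepA_zero]
      simp only [if_neg hdiv]
      rw [show ((0 : Int) + 1)
          = ((([some l] : List (Option (List Char))).length + 0 : Nat) : Int) by norm_num]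
      rw [show (some l :: some n :: List.map some rest)
          = ([some l] : List (Option (List Char))) ++ List.map some (n :: rest) from rfl]
      rw [pvFold_shift]
      simp only [Nat.cast_zero, List.filterMap_append]
      rw [ih, pvM]
      simp only [if_neg hdiv]
      rfl

-- ===== VERDICT (by name: the statement is the Claim_ definition above) =====
theorem tidy_html_spec : Claim_equal_tidy_html := by
  intro lines _hdom
  show tidy_html lines = tidy_html_alt lines
  simp only [tidy_html, tidy_html_alt]
  rw [pvLA, pvLB,
    show (lines.map String.toList).map pvHr = lines.map (fun s => pvHr s.toList) by
      rw [List.map_map]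
      rfl]
  rfl
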